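-- pv_equiv track=rewrite | github.com/maksverver/AdventOfCode | 2023/25-stoer-wagner.py | MinimumCutPhase
-- ===== SOURCE A (Python) =====
-- from heapq import heappop, heappush
--
-- def MinimumCutPhase(adj):
--   assert len(adj) >= 2
--   added = [False]*len(adj)
--   weight = [0]*len(adj)
--   queue = [(0, v) for v in range(len(adj))]
--   s = t = None
--   while queue:
--     _, v = heappop(queue)
--     if added[v]: continue
--     added[v] = True
--     s, t = t, v
--     for w in adj[v]:
--       if not added[w]:
--         weight[w] += 1
--         heappush(queue, (-weight[w], w))
--   return s, t, weight[t]
-- ===== SOURCE B (Python) =====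
-- def MinimumCutPhase(adj):
--   n = len(adj)
--   assert n >= 2
--   added = [False] * n
--   # One live priority entry per pending vertex: (negated weight, name), where the
--   # name is how the vertex was last reached (initially its own index).  Extracting
--   # the best vertex is a linear min() scan over the live entries, so there is no
--   # heap and there are no stale entries to skip.
--   entry = [(0, v) for v in range(n)]
--   s = t = None
--   for _ in range(n):
--     v = min((i for i in range(n) if not added[i]), key=lambda i: entry[i])
--     added[v] = True
--     s, t = t, entry[v][1]
--     for w in adj[v]:
--       if not added[w]:
--         entry[w] = (entry[w][0] - 1, w)
--   return s, t, -entry[t][0]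
-- ===== Notes on version B (the rewrite author's own statement) =====
-- stated objective: alternative
-- what changed: Replaces the lazy-deletion binary heap (heappush/heappop of (-weight, vertex) tuples that skips already-extracted vertices) by an array-backed priority structure: one live (negated weight, name) entry per pending vertex, extracted each of the n rounds by a linear min() scan; Pre_ excludes exactly the inputs where A raises (length < 2: AssertionError; an entry outside [-len(adj), len(adj)): IndexError).
import Mathlib
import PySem

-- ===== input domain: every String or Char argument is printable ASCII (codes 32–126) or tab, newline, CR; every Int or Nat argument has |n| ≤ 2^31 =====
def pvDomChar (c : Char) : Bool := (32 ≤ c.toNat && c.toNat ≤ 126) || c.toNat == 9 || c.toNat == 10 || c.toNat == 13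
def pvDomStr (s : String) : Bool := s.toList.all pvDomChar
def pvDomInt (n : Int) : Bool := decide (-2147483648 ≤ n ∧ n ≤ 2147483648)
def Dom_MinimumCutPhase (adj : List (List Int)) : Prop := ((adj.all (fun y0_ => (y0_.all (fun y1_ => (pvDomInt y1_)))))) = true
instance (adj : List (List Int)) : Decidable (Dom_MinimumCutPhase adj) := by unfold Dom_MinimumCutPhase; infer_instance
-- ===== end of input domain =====

-- B replaces the lazy-deletion binary heap by an array-backed priority structure:
-- one live (negated weight, name) entry per pending vertex, extract-min by a linear
-- scan — same return value, no heap needed.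

-- Python list index: a possibly negative index i with -len ≤ i < len names cell
-- i + len when negative (exact on that range; outside it Python raises, see Pre_).
def pyIdx (n : Nat) (i : Int) : Nat := (if i < 0 then i + (n : Int) else i).toNat

-- ===== PORT A =====
-- Python-tuple lexicographic ≤ on (Int × Int) pairs, exactly heapq's comparison.
def pairLe (a b : Int × Int) : Bool := a.1 < b.1 || (a.1 == b.1 && a.2 ≤ b.2)

-- heapq is modelled exactly as extract-min on the multiset of entries: heappop returns
-- the lexicographically smallest tuple; entries that compare equal are identical pairs,
-- so which occurrence is removed is unobservable.
def findMinPair : (Int × Int) → List (Int × Int) → (Int × Int)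
  | m, [] => m
  | m, x :: xs => findMinPair (if pairLe m x then m else x) xs

-- the inner `for w in adj[v]` loop of A: updates weight and pushes (-weight[w], w)
def relaxA (n : Nat) (added : List Bool) : List Int × List (Int × Int) → List Int → List Int × List (Int × Int)
  | st, [] => st
  | (wt, qq), w :: rest =>
    if added.getD (pyIdx n w) false then relaxA n added (wt, qq) rest
    else
      let wt' := wt.set (pyIdx n w) (wt.getD (pyIdx n w) 0 + 1)
      relaxA n added (wt', qq ++ [(-(wt'.getD (pyIdx n w) 0), w)]) rest

-- the `while queue` loop of A; fuel bounds the number of pops (each element is popped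
-- at most once and at most len(adj)+Σ|adj[v]| elements are ever inserted); it is a
-- totality guard only and never changes the computed value on inputs in Pre_.
def loopA (adj : List (List Int)) : Nat → List Bool → List Int → Option Int → Option Int → List (Int × Int) → Option Int × Option Int × List Int
  | 0, _, wt, s, t, _ => (s, t, wt)
  | fuel + 1, added, wt, s, t, q =>
    match q with
    | [] => (s, t, wt)
    | x :: xs =>
      let m := findMinPair x xs
      let q' := (x :: xs).erase m
      if added.getD (pyIdx adj.length m.2) false then loopA adj fuel added wt s t q'
      else
        let added' := added.set (pyIdx adj.length m.2) true
        let r := relaxA adj.length added' (wt, q') (adj.getD (pyIdx adj.length m.2) [])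
        loopA adj fuel added' r.1 t (some m.2) r.2

def MinimumCutPhase (adj : List (List Int)) : Int × Int × Int :=
  match loopA adj (adj.length + (adj.map List.length).sum + 1)
      (List.replicate adj.length false) (List.replicate adj.length 0) none none
      ((List.range adj.length).map (fun (v : Nat) => ((0 : Int), (v : Int)))) with
  | (s, t, wt) => (s.getD 0, t.getD 0, wt.getD (pyIdx adj.length (t.getD 0)) 0)

-- ===== PORT B =====
-- Python-tuple lexicographic < on (Int × Int) pairs (min's key comparison)
def pairLt (a b : Int × Int) : Bool := a.1 < b.1 || (a.1 == b.1 && a.2 < b.2)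

-- the generator inside B's min(...): keep the first index with strictly smallest entry
def selF (added : List Bool) (entry : List (Int × Int)) (best : Option Nat) (i : Nat) : Option Nat :=
  if !(added.getD i false) && best.all (fun b => pairLt (entry.getD i (0, 0)) (entry.getD b (0, 0)))
  then some i else best

def selectB (n : Nat) (added : List Bool) (entry : List (Int × Int)) : Option Nat :=
  (List.range n).foldl (selF added entry) none

-- the inner `for w in adj[v]` loop of B: replace the entry of each unadded neighbour
def relaxB (n : Nat) (added : List Bool) : List (Int × Int) → List Int → List (Int × Int)
  | entry, [] => entry
  | entry, w :: rest =>
    if added.getD (pyIdx n w) false then relaxB n added entry rest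
    else relaxB n added (entry.set (pyIdx n w) ((entry.getD (pyIdx n w) (0, 0)).1 - 1, w)) rest

-- the `for _ in range(n)` loop of B, counted downwards; the `none` branch is where
-- Python's min() would raise on an empty scan — unreachable on inputs in Pre_.
def loopB (adj : List (List Int)) : Nat → List Bool → List (Int × Int) → Option Int → Option Int → Option Int × Option Int × List (Int × Int)
  | 0, _, entry, s, t => (s, t, entry)
  | k + 1, added, entry, s, t =>
    match selectB adj.length added entry with
    | none => (s, t, entry)
    | some v =>
      let added' := added.set v true
      loopB adj k added' (relaxB adj.length added' entry (adj.getD v []))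
        t (some ((entry.getD v (0, 0)).2))

def MinimumCutPhase_alt (adj : List (List Int)) : Int × Int × Int :=
  match loopB adj adj.length (List.replicate adj.length false)
      ((List.range adj.length).map (fun (v : Nat) => ((0 : Int), (v : Int)))) none none with
  | (s, t, e) => (s.getD 0, t.getD 0, -((e.getD (pyIdx adj.length (t.getD 0)) (0, 0)).1))

-- ===== PRECONDITION & SPEC =====
-- Pre_ is exactly where Python A returns: it excludes adjacency lists of length < 2
-- (AssertionError) and ones with an entry outside [-len(adj), len(adj)) (IndexError);
-- entries in [-len(adj), 0) are admitted: Python resolves a negative index i to cell i + len(adj).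
def Pre_MinimumCutPhase (adj : List (List Int)) : Prop :=
  2 ≤ adj.length ∧ ∀ row ∈ adj, ∀ w ∈ row, -(adj.length : Int) ≤ w ∧ w < (adj.length : Int)
instance (adj : List (List Int)) : Decidable (Pre_MinimumCutPhase adj) := by unfold Pre_MinimumCutPhase; infer_instance

def pvWitness_MinimumCutPhase : List (List Int) := [[1], [0]]

def Spec_MinimumCutPhase (adj : List (List Int)) (out : Int × Int × Int) : Prop := out = MinimumCutPhase_alt adj
instance (adj : List (List Int)) (out : Int × Int × Int) : Decidable (Spec_MinimumCutPhase adj out) := by unfold Spec_MinimumCutPhase; infer_instance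

-- ===== CLAIM (what is proved, stated in full; the proofs are below) =====
def Claim_equal_MinimumCutPhase : Prop := ∀ (adj : List (List Int)), Dom_MinimumCutPhase adj → Pre_MinimumCutPhase adj → Spec_MinimumCutPhase adj (MinimumCutPhase adj)

-- ===== LEMMAS AND PROOFS =====

-- lexicographic order on pairs (Prop form of pairLe/pairLt) and its basic facts
def lexLe (a b : Int × Int) : Prop := a.1 < b.1 ∨ (a.1 = b.1 ∧ a.2 ≤ b.2)
def lexLt (a b : Int × Int) : Prop := a.1 < b.1 ∨ (a.1 = b.1 ∧ a.2 < b.2)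

theorem lexLe_refl (a : Int × Int) : lexLe a a := Or.inr ⟨rfl, le_refl _⟩

theorem lexLe_trans {a b c : Int × Int} (h1 : lexLe a b) (h2 : lexLe b c) : lexLe a c := by
  unfold lexLe at *; omega

theorem lexLt_le_trans {a b c : Int × Int} (h1 : lexLt a b) (h2 : lexLe b c) : lexLe a c := by
  unfold lexLt lexLe at *; omega

theorem lexLe_antisymm {a b : Int × Int} (h1 : lexLe a b) (h2 : lexLe b a) : a = b := by
  unfold lexLe at *
  have e1 : a.1 = b.1 := by omega
  have e2 : a.2 = b.2 := by omega
  exact Prod.ext e1 e2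

theorem pairLe_true {a b : Int × Int} (h : pairLe a b = true) : lexLe a b := by
  unfold pairLe at h; unfold lexLe
  simp only [Bool.or_eq_true, Bool.and_eq_true, decide_eq_true_eq, beq_iff_eq] at h
  omega

theorem pairLe_false {a b : Int × Int} (h : pairLe a b = false) : lexLe b a := by
  unfold pairLe at h; unfold lexLe
  simp only [Bool.or_eq_false_iff, Bool.and_eq_false_iff, decide_eq_false_iff_not, beq_eq_false_iff_ne] at h
  omega

theorem pairLt_true {a b : Int × Int} (h : pairLt a b = true) : lexLt a b := by
  unfold pairLt at h; unfold lexLt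
  simp only [Bool.or_eq_true, Bool.and_eq_true, decide_eq_true_eq, beq_iff_eq] at h
  omega

theorem pairLt_false {a b : Int × Int} (h : pairLt a b = false) : lexLe b a := by
  unfold pairLt at h; unfold lexLe
  simp only [Bool.or_eq_false_iff, Bool.and_eq_false_iff, decide_eq_false_iff_not, beq_eq_false_iff_ne] at h
  omega

theorem findMin_mem : ∀ (xs : List (Int × Int)) (m : Int × Int), findMinPair m xs ∈ m :: xs := by
  intro xs
  induction xs with
  | nil => intro m; simp [findMinPair]
  | cons x xs ih =>
    intro m
    simp only [findMinPair]
    cases h : pairLe m x with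
    | false =>
      simp only [Bool.false_eq_true, if_false]
      have := ih x; simp at this ⊢; tauto
    | true =>
      simp only [if_true]
      have := ih m; simp at this ⊢; tauto

theorem findMin_le : ∀ (xs : List (Int × Int)) (m a : Int × Int), a ∈ m :: xs → lexLe (findMinPair m xs) a := by
  intro xs
  induction xs with
  | nil =>
    intro m a ha; simp at ha; subst ha; simp [findMinPair, lexLe_refl]
  | cons x xs ih =>
    intro m a ha
    simp only [findMinPair]
    cases h : pairLe m x with
    | false =>
      have hxm : lexLe x m := pairLe_false h
      simp only [Bool.false_eq_true, if_false]
      simp only [List.mem_cons] at ha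
      rcases ha with ha | ha | ha
      · subst ha; exact lexLe_trans (ih x x (by simp)) hxm
      · subst ha; exact ih a a (by simp)
      · exact ih x a (by simp [ha])
    | true =>
      have hmx : lexLe m x := pairLe_true h
      simp only [if_true]
      simp only [List.mem_cons] at ha
      rcases ha with ha | ha | ha
      · subst ha; exact ih a a (by simp)
      · subst ha; exact lexLe_trans (ih m m (by simp)) hmx
      · exact ih m a (by simp [ha])

-- pyIdx facts
theorem pyIdx_lt {n : Nat} {x : Int} (h1 : -(n : Int) ≤ x) (h2 : x < (n : Int)) :
    pyIdx n x < n := by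
  unfold pyIdx; split <;> omega

theorem pyIdx_raw {n : Nat} {x : Int} (h1 : -(n : Int) ≤ x) (h2 : x < (n : Int)) :
    x = (pyIdx n x : Int) ∨ x = (pyIdx n x : Int) - (n : Int) := by
  unfold pyIdx; split <;> omega

theorem pyIdx_of_raw {n u : Nat} {x : Int} (hu : u < n)
    (h : x = (u : Int) ∨ x = (u : Int) - (n : Int)) : pyIdx n x = u := by
  unfold pyIdx; split <;> omega

-- names are the vertex index or the index minus n, so equal names mean equal vertices
theorem nameForm_inj {n : Nat} {entry : List (Int × Int)}
    (form : ∀ u, u < n → (entry.getD u (0, 0)).2 = (u : Int) ∨ (entry.getD u (0, 0)).2 = (u : Int) - (n : Int))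
    {u1 u2 : Nat} (h1 : u1 < n) (h2 : u2 < n)
    (he : (entry.getD u1 (0, 0)).2 = (entry.getD u2 (0, 0)).2) : u1 = u2 := by
  rcases form u1 h1 with a | a <;> rcases form u2 h2 with b | b <;> omega

-- getD / set helpers
theorem getD_set_eq {α : Type} (l : List α) (i : Nat) (v d : α) (h : i < l.length) :
    (l.set i v).getD i d = v := by
  simp [List.getD_eq_getElem?_getD, h]

theorem getD_set_ne {α : Type} (l : List α) (i j : Nat) (v d : α) (h : i ≠ j) :
    (l.set i v).getD j d = l.getD j d := by
  simp [List.getD_eq_getElem?_getD, List.getElem?_set_ne h]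

-- count-false bookkeeping for the `added` array
theorem count_cons_false_true (t : List Bool) : ((true : Bool) :: t).count false = t.count false := by simp

theorem count_cons_false_false (t : List Bool) : ((false : Bool) :: t).count false = t.count false + 1 := by simp

theorem count_false_set : ∀ (l : List Bool) (v : Nat), v < l.length → l.getD v false = false →
    (l.set v true).count false + 1 = l.count false := by
  intro l
  induction l with
  | nil => intro v hv; simp at hv
  | cons b t ih =>
    intro v hv hb
    cases v with
    | zero =>
      simp only [List.getD_cons_zero] at hb
      subst hb
      rw [List.set_cons_zero, count_cons_false_true, count_cons_false_false]
    | succ v =>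
      simp only [List.length_cons] at hv
      have hrec := ih v (by omega) (by simpa using hb)
      rw [List.set_cons_succ]
      cases b
      · rw [count_cons_false_false, count_cons_false_false]; omega
      · rw [count_cons_false_true, count_cons_false_true]; omega

theorem count_false_pos : ∀ (l : List Bool) (v : Nat), v < l.length → l.getD v false = false →
    0 < l.count false := by
  intro l
  induction l with
  | nil => intro v hv; simp at hv
  | cons b t ih =>
    intro v hv hb
    cases v with
    | zero =>
      simp only [List.getD_cons_zero] at hb
      subst hb
      rw [count_cons_false_false]; omega
    | succ v =>
      simp only [List.length_cons] at hv
      have hrec := ih v (by omega) (by simpa using hb)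
      cases b
      · rw [count_cons_false_false]; omega
      · rw [count_cons_false_true]; omega

theorem count_false_zero : ∀ (l : List Bool), (∀ v, v < l.length → l.getD v false = true) →
    l.count false = 0 := by
  intro l
  induction l with
  | nil => intro _; simp
  | cons b t ih =>
    intro h
    have hb : b = true := by have := h 0 (by simp); simpa using this
    subst hb
    rw [count_cons_false_true]
    exact ih (fun v hv => by have := h (v + 1) (by simp only [List.length_cons]; omega); simpa using this)

-- characterisation of B's linear-scan min
theorem selF_none_un (added : List Bool) (entry : List (Int × Int)) (k : Nat)
    (h : added.getD k false = false) : selF added entry none k = some k := by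
  unfold selF; simp only [List.getD_eq_getElem?_getD] at h ⊢; simp [h]

theorem selF_add (added : List Bool) (entry : List (Int × Int)) (prev : Option Nat) (k : Nat)
    (h : added.getD k false = true) : selF added entry prev k = prev := by
  unfold selF; simp only [List.getD_eq_getElem?_getD] at h ⊢; simp [h]

theorem selF_pick (added : List Bool) (entry : List (Int × Int)) (b k : Nat)
    (h : added.getD k false = false)
    (h2 : pairLt (entry.getD k (0, 0)) (entry.getD b (0, 0)) = true) :
    selF added entry (some b) k = some k := by
  unfold selF; simp only [List.getD_eq_getElem?_getD] at h h2 ⊢; simp [h, h2]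

theorem selF_keep (added : List Bool) (entry : List (Int × Int)) (b k : Nat)
    (h : added.getD k false = false)
    (h2 : pairLt (entry.getD k (0, 0)) (entry.getD b (0, 0)) = false) :
    selF added entry (some b) k = some b := by
  unfold selF; simp only [List.getD_eq_getElem?_getD] at h h2 ⊢; simp [h, h2]

theorem selectB_fold (added : List Bool) (entry : List (Int × Int)) : ∀ (k : Nat),
    ((List.range k).foldl (selF added entry) none = none → ∀ i, i < k → added.getD i false = true)
    ∧ (∀ b, (List.range k).foldl (selF added entry) none = some b →
        b < k ∧ added.getD b false = false ∧
        ∀ i, i < k → added.getD i false = false → lexLe (entry.getD b (0, 0)) (entry.getD i (0, 0))) := by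
  intro k
  induction k with
  | zero => simp
  | succ k ih =>
    rw [List.range_succ, List.foldl_append]
    have hone : ∀ (prev : Option Nat), List.foldl (selF added entry) prev [k] = selF added entry prev k := by
      intro prev; simp
    rw [hone]
    rcases hprev : (List.range k).foldl (selF added entry) none with _ | b
    · cases ha : added.getD k false with
      | false =>
        rw [selF_none_un _ _ _ ha]
        constructor
        · intro h; cases h
        · intro b' hb'
          injection hb' with hb'; subst hb'
          refine ⟨Nat.lt_succ_self k, ha, ?_⟩
          intro i hi hui
          rcases Nat.lt_or_ge i k with hik | hik
          · exact absurd (ih.1 hprev i hik) (by rw [hui]; simp)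
          · have : i = k := by omega
            subst this; exact lexLe_refl _
      | true =>
        rw [selF_add _ _ _ _ ha]
        constructor
        · intro _ i hi
          rcases Nat.lt_or_ge i k with hik | hik
          · exact ih.1 hprev i hik
          · have : i = k := by omega
            subst this; exact ha
        · intro b' hb'; cases hb'
    · obtain ⟨hbk, hbu, hble⟩ := ih.2 b hprev
      cases ha : added.getD k false with
      | true =>
        rw [selF_add _ _ _ _ ha]
        constructor
        · intro h; cases h
        · intro b' hb'
          injection hb' with hb'; subst hb'
          refine ⟨by omega, hbu, ?_⟩
          intro i hi hui
          rcases Nat.lt_or_ge i k with hik | hik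
          · exact hble i hik hui
          · have : i = k := by omega
            subst this; rw [hui] at ha; cases ha
      | false =>
        cases hlt : pairLt (entry.getD k (0, 0)) (entry.getD b (0, 0)) with
        | true =>
          rw [selF_pick _ _ _ _ ha hlt]
          constructor
          · intro h; cases h
          · intro b' hb'
            injection hb' with hb'; subst hb'
            refine ⟨Nat.lt_succ_self k, ha, ?_⟩
            intro i hi hui
            rcases Nat.lt_or_ge i k with hik | hik
            · exact lexLt_le_trans (pairLt_true hlt) (hble i hik hui)
            · have : i = k := by omega
              subst this; exact lexLe_refl _
        | false =>
          rw [selF_keep _ _ _ _ ha hlt]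
          constructor
          · intro h; cases h
          · intro b' hb'
            injection hb' with hb'; subst hb'
            refine ⟨by omega, hbu, ?_⟩
            intro i hi hui
            rcases Nat.lt_or_ge i k with hik | hik
            · exact hble i hik hui
            · have : i = k := by omega
              subst this; exact pairLt_false hlt

theorem selectB_eq (n : Nat) (added : List Bool) (entry : List (Int × Int)) (v : Nat)
    (form : ∀ u, u < n → (entry.getD u (0, 0)).2 = (u : Int) ∨ (entry.getD u (0, 0)).2 = (u : Int) - (n : Int))
    (h1 : v < n) (h2 : added.getD v false = false)
    (h3 : ∀ u, u < n → added.getD u false = false → lexLe (entry.getD v (0, 0)) (entry.getD u (0, 0))) :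
    selectB n added entry = some v := by
  unfold selectB
  rcases h : (List.range n).foldl (selF added entry) none with _ | b
  · exact absurd ((selectB_fold added entry n).1 h v h1) (by rw [h2]; simp)
  · obtain ⟨hbn, hbu, hble⟩ := (selectB_fold added entry n).2 b h
    have e : entry.getD b (0, 0) = entry.getD v (0, 0) := lexLe_antisymm (hble v h1 h2) (h3 b hbn hbu)
    have e2 : (entry.getD b (0, 0)).2 = (entry.getD v (0, 0)).2 := congrArg Prod.snd e
    have : b = v := nameForm_inj form hbn h1 e2
    simp [this]

-- the two relaxation loops run in lockstep: B's entry first components stay the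
-- negated A weights, and A's queue keeps the invariant relative to B's entries
theorem relax_sync (n : Nat) (added : List Bool) :
    ∀ (l : List Int) (entry : List (Int × Int)) (wt : List Int) (qq : List (Int × Int)),
    entry.length = n → wt.length = n →
    (∀ u, u < n → (entry.getD u (0, 0)).1 = -(wt.getD u 0)) →
    (∀ w ∈ l, -(n : Int) ≤ w ∧ w < (n : Int)) →
    (∀ u, u < n → (entry.getD u (0, 0)).2 = (u : Int) ∨ (entry.getD u (0, 0)).2 = (u : Int) - (n : Int)) →
    (∀ u, u < n → added.getD u false = false → entry.getD u (0, 0) ∈ qq) →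
    (∀ p ∈ qq, -(n : Int) ≤ p.2 ∧ p.2 < (n : Int) ∧
      (added.getD (pyIdx n p.2) false = false →
        (entry.getD (pyIdx n p.2) (0, 0)).1 ≤ p.1 ∧
        (p.1 = (entry.getD (pyIdx n p.2) (0, 0)).1 → p.2 = (entry.getD (pyIdx n p.2) (0, 0)).2))) →
    (relaxB n added entry l).length = n
    ∧ (relaxA n added (wt, qq) l).1.length = n
    ∧ (∀ u, u < n → ((relaxB n added entry l).getD u (0, 0)).1 = -((relaxA n added (wt, qq) l).1.getD u 0))
    ∧ (∀ u, u < n → ((relaxB n added entry l).getD u (0, 0)).2 = (u : Int)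
        ∨ ((relaxB n added entry l).getD u (0, 0)).2 = (u : Int) - (n : Int))
    ∧ (∀ u, u < n → added.getD u false = false →
        (relaxB n added entry l).getD u (0, 0) ∈ (relaxA n added (wt, qq) l).2)
    ∧ (∀ p ∈ (relaxA n added (wt, qq) l).2, -(n : Int) ≤ p.2 ∧ p.2 < (n : Int) ∧
        (added.getD (pyIdx n p.2) false = false →
          ((relaxB n added entry l).getD (pyIdx n p.2) (0, 0)).1 ≤ p.1 ∧
          (p.1 = ((relaxB n added entry l).getD (pyIdx n p.2) (0, 0)).1 →
            p.2 = ((relaxB n added entry l).getD (pyIdx n p.2) (0, 0)).2)))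
    ∧ (relaxA n added (wt, qq) l).2.length ≤ qq.length + l.length := by
  intro l
  induction l with
  | nil =>
    intro entry wt qq hle hlw hlink _ hform hmem hbnd
    simp only [relaxA, relaxB]
    exact ⟨hle, hlw, hlink, hform, hmem, hbnd, by simp⟩
  | cons w rest ih =>
    intro entry wt qq hle hlw hlink hl hform hmem hbnd
    have hw : -(n : Int) ≤ w ∧ w < (n : Int) := hl w (by simp)
    have hwn : pyIdx n w < n := pyIdx_lt hw.1 hw.2
    have hwraw : w = (pyIdx n w : Int) ∨ w = (pyIdx n w : Int) - (n : Int) := pyIdx_raw hw.1 hw.2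
    simp only [relaxA, relaxB]
    cases h : added.getD (pyIdx n w) false with
    | false =>
      simp only [Bool.false_eq_true, if_false]
      have hwlt : pyIdx n w < wt.length := by omega
      have helt : pyIdx n w < entry.length := by omega
      set c := pyIdx n w with hc
      set wt1 := wt.set c (wt.getD c 0 + 1) with hwt1
      set ent1 := entry.set c ((entry.getD c (0, 0)).1 - 1, w) with hent1
      have hget : wt1.getD c 0 = wt.getD c 0 + 1 := getD_set_eq _ _ _ _ hwlt
      have hgete : ent1.getD c (0, 0) = ((entry.getD c (0, 0)).1 - 1, w) := getD_set_eq _ _ _ _ helt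
      set e : Int × Int := (-(wt1.getD c 0), w) with he
      have hecell : ent1.getD c (0, 0) = e := by
        rw [hgete, he, hget]
        have := hlink c (by omega)
        exact Prod.ext (by dsimp only; omega) rfl
      have h1 : ent1.length = n := by simp [hent1, hle]
      have h1w : wt1.length = n := by simp [hwt1, hlw]
      have hlink1 : ∀ u, u < n → (ent1.getD u (0, 0)).1 = -(wt1.getD u 0) := by
        intro u hu
        by_cases huc : u = c
        · subst huc; rw [hgete, hget]
          have := hlink c (by omega)
          dsimp only; omega
        · rw [getD_set_ne _ _ _ _ _ (fun hh => huc hh.symm),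
            getD_set_ne (l := wt) _ _ _ _ (fun hh => huc hh.symm)]
          exact hlink u hu
      have h2 : ∀ w' ∈ rest, -(n : Int) ≤ w' ∧ w' < (n : Int) := fun w' hw' => hl w' (by simp [hw'])
      have h3 : ∀ u, u < n → (ent1.getD u (0, 0)).2 = (u : Int) ∨ (ent1.getD u (0, 0)).2 = (u : Int) - (n : Int) := by
        intro u hu
        by_cases huc : u = c
        · subst huc; rw [hgete]; rw [hc] at hwraw ⊢; exact hwraw
        · rw [getD_set_ne _ _ _ _ _ (fun hh => huc hh.symm)]
          exact hform u hu
      have h4 : ∀ u, u < n → added.getD u false = false → ent1.getD u (0, 0) ∈ qq ++ [e] := by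
        intro u hu hau
        by_cases huc : u = c
        · subst huc
          rw [hecell]
          exact List.mem_append_right _ (List.mem_singleton_self e)
        · rw [getD_set_ne _ _ _ _ _ (fun hh => huc hh.symm)]
          exact List.mem_append_left _ (hmem u hu hau)
      have h5 : ∀ p ∈ qq ++ [e], -(n : Int) ≤ p.2 ∧ p.2 < (n : Int) ∧
          (added.getD (pyIdx n p.2) false = false →
            (ent1.getD (pyIdx n p.2) (0, 0)).1 ≤ p.1 ∧
            (p.1 = (ent1.getD (pyIdx n p.2) (0, 0)).1 → p.2 = (ent1.getD (pyIdx n p.2) (0, 0)).2)) := by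
        intro p hp
        rcases List.mem_append.1 hp with hp | hp
        · obtain ⟨b1, b2, b3⟩ := hbnd p hp
          refine ⟨b1, b2, fun hpu => ?_⟩
          obtain ⟨b4, b5⟩ := b3 hpu
          by_cases hpc : pyIdx n p.2 = c
          · rw [hpc, hgete]
            dsimp only
            constructor
            · rw [hpc] at b4; omega
            · intro hh; rw [hpc] at b4; omega
          · rw [getD_set_ne _ _ _ _ _ (fun hh => hpc hh.symm)]
            exact ⟨b4, b5⟩
        · simp only [List.mem_singleton] at hp; subst hp
          refine ⟨hw.1, hw.2, fun _ => ?_⟩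
          rw [← hc, hecell]
          exact ⟨le_refl _, fun _ => rfl⟩
      obtain ⟨c1, c2, c3, c4, c5, c6, c7⟩ := ih ent1 wt1 (qq ++ [e]) h1 h1w hlink1 h2 h3 h4 h5
      refine ⟨c1, c2, c3, c4, c5, c6, ?_⟩
      have hlen2 : (qq ++ [e]).length = qq.length + 1 := by simp
      have hlen3 : (w :: rest).length = rest.length + 1 := rfl
      omega
    | true =>
      simp only [if_true]
      have h2 : ∀ w' ∈ rest, -(n : Int) ≤ w' ∧ w' < (n : Int) := fun w' hw' => hl w' (by simp [hw'])
      obtain ⟨c1, c2, c3, c4, c5, c6, c7⟩ := ih entry wt qq hle hlw hlink h2 hform hmem hbnd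
      refine ⟨c1, c2, c3, c4, c5, c6, ?_⟩
      have hlen3 : (w :: rest).length = rest.length + 1 := rfl
      omega

-- remaining relaxation capacity: total adjacency length over unadded vertices
def srem (adj : List (List Int)) (added : List Bool) : Nat :=
  ∑ u ∈ Finset.range adj.length, (if added.getD u false then 0 else (adj.getD u []).length)

theorem srem_set (adj : List (List Int)) (added : List Bool) (v : Nat)
    (h1 : v < adj.length) (h2 : added.getD v false = false) (h3 : v < added.length) :
    srem adj (added.set v true) + (adj.getD v []).length = srem adj added := by
  unfold srem
  have hv : v ∈ Finset.range adj.length := Finset.mem_range.2 h1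
  rw [← Finset.add_sum_erase _ _ hv, ← Finset.add_sum_erase _ _ hv]
  have e1 : (added.set v true).getD v false = true := getD_set_eq _ _ _ _ h3
  have e2 : ∀ u ∈ (Finset.range adj.length).erase v,
      (if (added.set v true).getD u false then 0 else (adj.getD u []).length)
      = (if added.getD u false then 0 else (adj.getD u []).length) := by
    intro u hu
    have : v ≠ u := fun hh => (Finset.mem_erase.1 hu).1 hh.symm
    rw [getD_set_ne _ _ _ _ _ this]
  rw [Finset.sum_congr rfl e2, e1, h2]
  simp [Nat.add_comm]

theorem sum_getD_len : ∀ (adj : List (List Int)),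
    ∑ u ∈ Finset.range adj.length, (adj.getD u []).length = (adj.map List.length).sum := by
  intro adj
  induction adj with
  | nil => simp
  | cons a t ih =>
    have : (a :: t).length = t.length + 1 := by simp
    rw [this, Finset.sum_range_succ' (fun u => (((a :: t).getD u []).length)) t.length]
    simp only [List.getD_cons_succ, List.getD_cons_zero]
    rw [ih]
    simp [Nat.add_comm]

theorem srem_le (adj : List (List Int)) (added : List Bool) :
    srem adj added ≤ (adj.map List.length).sum := by
  unfold srem
  calc ∑ u ∈ Finset.range adj.length, (if added.getD u false then 0 else (adj.getD u []).length)
      ≤ ∑ u ∈ Finset.range adj.length, (adj.getD u []).length := by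
        apply Finset.sum_le_sum
        intro u _
        split <;> simp
    _ = (adj.map List.length).sum := sum_getD_len adj

-- the loop invariant tying A's weight array and queue to B's entry array
structure LoopInv (n : Nat) (added : List Bool) (wt : List Int) (entry : List (Int × Int)) (q : List (Int × Int)) : Prop where
  la : added.length = n
  lw : wt.length = n
  le : entry.length = n
  link : ∀ u, u < n → (entry.getD u (0, 0)).1 = -(wt.getD u 0)
  form : ∀ u, u < n → (entry.getD u (0, 0)).2 = (u : Int) ∨ (entry.getD u (0, 0)).2 = (u : Int) - (n : Int)
  mem : ∀ u, u < n → added.getD u false = false → entry.getD u (0, 0) ∈ q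
  bnd : ∀ p ∈ q, -(n : Int) ≤ p.2 ∧ p.2 < (n : Int) ∧
        (added.getD (pyIdx n p.2) false = false →
          (entry.getD (pyIdx n p.2) (0, 0)).1 ≤ p.1 ∧
          (p.1 = (entry.getD (pyIdx n p.2) (0, 0)).1 → p.2 = (entry.getD (pyIdx n p.2) (0, 0)).2))

-- what the two loops must agree on for the final returns to coincide
def SyncOut (A : Option Int × Option Int × List Int) (B : Option Int × Option Int × List (Int × Int)) : Prop :=
  A.1 = B.1 ∧ A.2.1 = B.2.1 ∧ ∀ u : Nat, ((B.2.2.getD u ((0 : Int), (0 : Int))).1) = -(A.2.2.getD u 0)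

-- main synchronisation: the heap loop matches the scan loop round for round
theorem sync (adj : List (List Int))
    (H : ∀ row ∈ adj, ∀ w ∈ row, -(adj.length : Int) ≤ w ∧ w < (adj.length : Int)) :
    ∀ (fuel : Nat) (added : List Bool) (wt : List Int) (entry : List (Int × Int)) (q : List (Int × Int)) (s t : Option Int),
    LoopInv adj.length added wt entry q →
    q.length + srem adj added ≤ fuel →
    SyncOut (loopA adj fuel added wt s t q) (loopB adj (added.count false) added entry s t) := by
  intro fuel
  induction fuel with
  | zero =>
    intro added wt entry q s t hinv hfuel
    have hq : q = [] := by
      cases q with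
      | nil => rfl
      | cons x xs => simp at hfuel
    subst hq
    have hcnt : added.count false = 0 := by
      apply count_false_zero
      intro v hv
      cases h : added.getD v false with
      | false => exact absurd (hinv.mem v (by have := hinv.la; omega) h) (List.not_mem_nil)
      | true => rfl
    rw [hcnt]
    refine ⟨rfl, rfl, ?_⟩
    intro u
    rcases Nat.lt_or_ge u adj.length with hu | hu
    · exact hinv.link u hu
    · have h1 : entry.length ≤ u := by have := hinv.le; omega
      have h2 : wt.length ≤ u := by have := hinv.lw; omega
      simp [loopA, loopB, List.getD_eq_getElem?_getD, List.getElem?_eq_none h1, List.getElem?_eq_none h2]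
  | succ fuel ih =>
    intro added wt entry q s t hinv hfuel
    cases q with
    | nil =>
      have hcnt : added.count false = 0 := by
        apply count_false_zero
        intro v hv
        cases h : added.getD v false with
        | false => exact absurd (hinv.mem v (by have := hinv.la; omega) h) (List.not_mem_nil)
        | true => rfl
      rw [hcnt]
      refine ⟨rfl, rfl, ?_⟩
      intro u
      rcases Nat.lt_or_ge u adj.length with hu | hu
      · exact hinv.link u hu
      · have h1 : entry.length ≤ u := by have := hinv.le; omega
        have h2 : wt.length ≤ u := by have := hinv.lw; omega
        simp [loopA, loopB, List.getD_eq_getElem?_getD, List.getElem?_eq_none h1, List.getElem?_eq_none h2]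
    | cons x xs =>
      set m := findMinPair x xs with hm
      have hmmem : m ∈ x :: xs := findMin_mem xs x
      obtain ⟨hm0, hmn, hmst⟩ := hinv.bnd m hmmem
      set v := pyIdx adj.length m.2 with hvdef
      have hvn : v < adj.length := by rw [hvdef]; exact pyIdx_lt hm0 hmn
      have hqlen : ((x :: xs).erase m).length = (x :: xs).length - 1 :=
        List.length_erase_of_mem hmmem
      cases ha : added.getD v false with
      | false =>
        obtain ⟨hge, hlab⟩ := hmst ha
        have hm1 : m.1 = (entry.getD v (0, 0)).1 := by
          have hle := findMin_le xs x (entry.getD v (0, 0)) (hinv.mem v hvn ha)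
          rw [← hm] at hle
          unfold lexLe at hle
          omega
        have hm2 : m.2 = (entry.getD v (0, 0)).2 := hlab hm1
        have hmE : m = entry.getD v (0, 0) := Prod.ext_iff.mpr ⟨hm1, hm2⟩
        have hbest : ∀ u, u < adj.length → added.getD u false = false →
            lexLe (entry.getD v (0, 0)) (entry.getD u (0, 0)) := by
          intro u hu hau
          have := findMin_le xs x (entry.getD u (0, 0)) (hinv.mem u hu hau)
          rw [← hm, hmE] at this
          exact this
        have hsel : selectB adj.length added entry = some v :=
          selectB_eq _ _ _ _ hinv.form hvn ha hbest
        obtain ⟨k, hk⟩ : ∃ k, added.count false = k + 1 := by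
          have := count_false_pos added v (by have := hinv.la; omega) ha
          exact ⟨added.count false - 1, by omega⟩
        set added' := added.set v true with hadded'
        set q' := (x :: xs).erase m with hq'
        have hrowmem : adj.getD v [] ∈ adj := by
          have : adj.getD v [] = adj[v] := List.getD_eq_getElem adj [] hvn
          rw [this]; exact List.getElem_mem hvn
        have hrow : ∀ w ∈ adj.getD v [], -(adj.length : Int) ≤ w ∧ w < (adj.length : Int) :=
          H _ hrowmem
        have hmemq' : ∀ u, u < adj.length → added'.getD u false = false →
            entry.getD u (0, 0) ∈ q' := by
          intro u hu hau
          have huv : u ≠ v := by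
            intro hh; subst hh
            rw [getD_set_eq _ _ _ _ (by have := hinv.la; omega)] at hau
            simp at hau
          rw [getD_set_ne _ _ _ _ _ (fun hh => huv hh.symm)] at hau
          apply (List.mem_erase_of_ne ?_).2 (hinv.mem u hu hau)
          rw [hmE]
          intro hh
          have he2 : (entry.getD u (0, 0)).2 = (entry.getD v (0, 0)).2 := congrArg Prod.snd hh
          exact huv (nameForm_inj hinv.form hu hvn he2)
        have hbndq' : ∀ p ∈ q', -(adj.length : Int) ≤ p.2 ∧ p.2 < (adj.length : Int) ∧
            (added'.getD (pyIdx adj.length p.2) false = false →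
              (entry.getD (pyIdx adj.length p.2) (0, 0)).1 ≤ p.1 ∧
              (p.1 = (entry.getD (pyIdx adj.length p.2) (0, 0)).1 →
                p.2 = (entry.getD (pyIdx adj.length p.2) (0, 0)).2)) := by
          intro p hp
          obtain ⟨b1, b2, b3⟩ := hinv.bnd p (List.erase_subset hp)
          refine ⟨b1, b2, fun hpu => ?_⟩
          apply b3
          by_cases hpv : pyIdx adj.length p.2 = v
          · rw [hpv, getD_set_eq _ _ _ _ (by have := hinv.la; omega)] at hpu
            simp at hpu
          · rwa [getD_set_ne _ _ _ _ _ (fun hh => hpv hh.symm)] at hpu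
        obtain ⟨c1, c2, c3, c4, c5, c6, c7⟩ := relax_sync adj.length added' (adj.getD v [])
          entry wt q' hinv.le hinv.lw hinv.link hrow hinv.form hmemq' hbndq'
        have hinv' : LoopInv adj.length added'
            (relaxA adj.length added' (wt, q') (adj.getD v [])).1
            (relaxB adj.length added' entry (adj.getD v []))
            (relaxA adj.length added' (wt, q') (adj.getD v [])).2 :=
          ⟨by simp [hadded', hinv.la], c2, c1, c3, c4, c5, c6⟩
        have hsrem : srem adj added' + (adj.getD v []).length = srem adj added :=
          srem_set adj added v hvn ha (by have := hinv.la; omega)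
        have hfuel' : (relaxA adj.length added' (wt, q') (adj.getD v [])).2.length
            + srem adj added' ≤ fuel := by
          have hx : (x :: xs).length = xs.length + 1 := by simp
          have hql : q'.length = (x :: xs).length - 1 := hqlen
          omega
        have ihres := ih added' (relaxA adj.length added' (wt, q') (adj.getD v [])).1
          (relaxB adj.length added' entry (adj.getD v []))
          (relaxA adj.length added' (wt, q') (adj.getD v [])).2 t (some m.2) hinv' hfuel'
        have hcnt' : added'.count false = k := by
          have hcs := count_false_set added v (by have := hinv.la; omega) ha
          rw [← hadded'] at hcs
          omega
        rw [hk]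
        have lhsStep : loopA adj (fuel + 1) added wt s t (x :: xs)
            = loopA adj fuel added' (relaxA adj.length added' (wt, q') (adj.getD v [])).1 t (some m.2)
                (relaxA adj.length added' (wt, q') (adj.getD v [])).2 := by
          simp only [loopA]
          rw [← hm, ← hvdef, ha]
          simp only [Bool.false_eq_true, if_false]
          rw [← hq', ← hadded']
        have rhsStep : loopB adj (k + 1) added entry s t
            = loopB adj k added' (relaxB adj.length added' entry (adj.getD v []))
                t (some ((entry.getD v (0, 0)).2)) := by
          simp only [loopB]
          rw [hsel]
        rw [lhsStep, rhsStep, ← hm2, ← hcnt']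
        exact ihres
      | true =>
        have hinv' : LoopInv adj.length added wt entry ((x :: xs).erase m) := by
          refine ⟨hinv.la, hinv.lw, hinv.le, hinv.link, hinv.form, ?_, ?_⟩
          · intro u hu hau
            apply (List.mem_erase_of_ne ?_).2 (hinv.mem u hu hau)
            intro hh
            have he2 : (entry.getD u (0, 0)).2 = m.2 := congrArg Prod.snd hh
            have hcell : pyIdx adj.length ((entry.getD u (0, 0)).2) = u := pyIdx_of_raw hu (hinv.form u hu)
            rw [he2, ← hvdef] at hcell
            rw [hcell, hau] at ha
            cases ha
          · intro p hp
            exact hinv.bnd p (List.erase_subset hp)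
        have hfuel' : ((x :: xs).erase m).length + srem adj added ≤ fuel := by
          have hx : (x :: xs).length = xs.length + 1 := by simp
          rw [hqlen, hx]
          simp only [hx] at hfuel
          omega
        have ihres := ih added wt entry ((x :: xs).erase m) s t hinv' hfuel'
        have lhsStep : loopA adj (fuel + 1) added wt s t (x :: xs)
            = loopA adj fuel added wt s t ((x :: xs).erase m) := by
          simp only [loopA]
          rw [← hm, ← hvdef, ha]
          rw [if_pos rfl]
        rw [lhsStep]
        exact ihres

-- initial state facts
theorem getD_init_pair (n u : Nat) (hu : u < n) :
    (((List.range n).map (fun (v : Nat) => ((0 : Int), (v : Int)))).getD u ((0 : Int), (0 : Int))) = ((0 : Int), (u : Int)) := by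
  simp [List.getD_eq_getElem?_getD, hu]

theorem init_inv (adj : List (List Int)) :
    LoopInv adj.length (List.replicate adj.length false) (List.replicate adj.length 0)
      ((List.range adj.length).map (fun (v : Nat) => ((0 : Int), (v : Int))))
      ((List.range adj.length).map (fun (v : Nat) => ((0 : Int), (v : Int)))) := by
  have hwt : ∀ u : Nat, (List.replicate adj.length (0 : Int)).getD u 0 = 0 := by
    intro u
    simp [List.getD_eq_getElem?_getD, List.getElem?_replicate]
    split <;> simp
  refine ⟨by simp, by simp, by simp, ?_, ?_, ?_, ?_⟩
  · intro u hu
    rw [getD_init_pair _ _ hu, hwt]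
    simp
  · intro u hu
    rw [getD_init_pair _ _ hu]
    left; rfl
  · intro u hu _
    rw [getD_init_pair _ _ hu]
    exact List.mem_map.2 ⟨u, List.mem_range.2 hu, rfl⟩
  · intro p hp
    obtain ⟨u, hu, hpe⟩ := List.mem_map.1 hp
    subst hpe
    dsimp only
    have hu' := List.mem_range.1 hu
    have hcast : ((u : Int)) < (adj.length : Int) := by exact_mod_cast hu'
    refine ⟨by omega, hcast, fun _ => ?_⟩
    have hidx : pyIdx adj.length ((u : Int)) = u := pyIdx_of_raw hu' (Or.inl rfl)
    rw [hidx, getD_init_pair _ _ hu']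
    exact ⟨le_refl _, fun _ => rfl⟩

-- ===== VERDICT (by name: the statement is the Claim_ definition above) =====
theorem MinimumCutPhase_spec : Claim_equal_MinimumCutPhase := by
  intro adj _ hpre
  unfold Spec_MinimumCutPhase MinimumCutPhase MinimumCutPhase_alt
  have hsync := sync adj hpre.2 (adj.length + (adj.map List.length).sum + 1)
    (List.replicate adj.length false) (List.replicate adj.length 0)
    ((List.range adj.length).map (fun (v : Nat) => ((0 : Int), (v : Int))))
    ((List.range adj.length).map (fun (v : Nat) => ((0 : Int), (v : Int)))) none none
    (init_inv adj)
    (by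
      have h1 : (((List.range adj.length).map (fun (v : Nat) => ((0 : Int), (v : Int)))).length)
          = adj.length := by simp
      have h2 := srem_le adj (List.replicate adj.length false)
      omega)
  have hc : (List.replicate adj.length false).count false = adj.length := by simp
  rw [hc] at hsync
  obtain ⟨hs, ht, hlink⟩ := hsync
  rcases hA : loopA adj (adj.length + (adj.map List.length).sum + 1)
      (List.replicate adj.length false) (List.replicate adj.length 0) none none
      ((List.range adj.length).map (fun (v : Nat) => ((0 : Int), (v : Int)))) with ⟨sa, ta, wta⟩
  rcases hB : loopB adj adj.length (List.replicate adj.length false)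
      ((List.range adj.length).map (fun (v : Nat) => ((0 : Int), (v : Int)))) none none with ⟨sb, tb, eb⟩
  rw [hA, hB] at hs ht hlink
  simp only at hs ht hlink ⊢
  rw [hs, ht]
  have := hlink (pyIdx adj.length (tb.getD 0))
  refine Prod.ext rfl (Prod.ext rfl ?_)
  dsimp only
  omega
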